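-- pv_equiv track=rewrite | github.com/AmanuelD02/Competitive-Programming | codeforces_contest/june-26/D_Poisoned_Dagger.py | monocarp
-- ===== SOURCE A (Python) =====
-- def count_health(k, lst):
--     total = k
--     for i in range(len(lst) -1):
--         total += min(k, lst[i+1] - lst[i])
--     return total
--
-- def monocarp(health, attacks):
--     left , right = 1, health
--     while left <= right:
--         mid = (left + right) //2
--         val  = count_health(mid, attacks)
--         if val==health:
--             return mid
--         if val > health:
--             right = mid -1
--         else:
--             left = mid +1
--     return left
-- ===== SOURCE B (Python) =====
-- def monocarp(health, attacks):
--     gaps = sorted(b - a for a, b in zip(attacks, attacks[1:]))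
--     m = len(gaps)
--     pre = 0
--     k = None
--     for j, g in enumerate(gaps):
--         slope = m - j + 1
--         if health <= pre + g * slope:
--             k = -((pre - health) // slope)
--             break
--         pre += g
--     else:
--         k = health - pre
--     return max(1, min(k, health + 1))
-- ===== Notes on version B (the rewrite author's own statement) =====
-- stated objective: faster
-- what changed: Replaced A's binary search over [1, health] (each probe rescanning all n gaps, ~31 full scans for 32-bit health) with sorting the n-1 attack gaps once and one linear pass that solves the piecewise-linear damage equation k + sum(min(k, gap)) >= health algebraically with a ceiling division.
import Mathlib
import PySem

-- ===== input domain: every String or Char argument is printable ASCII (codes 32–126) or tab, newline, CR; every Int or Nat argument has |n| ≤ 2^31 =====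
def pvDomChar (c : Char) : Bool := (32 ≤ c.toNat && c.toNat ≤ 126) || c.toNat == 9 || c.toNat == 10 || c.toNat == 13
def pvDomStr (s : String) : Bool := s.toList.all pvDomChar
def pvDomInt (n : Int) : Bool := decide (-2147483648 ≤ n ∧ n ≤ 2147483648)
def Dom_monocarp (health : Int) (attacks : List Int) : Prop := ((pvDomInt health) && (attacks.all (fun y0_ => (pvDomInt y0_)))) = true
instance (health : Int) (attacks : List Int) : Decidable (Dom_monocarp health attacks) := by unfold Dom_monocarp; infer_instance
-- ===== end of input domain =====

-- B replaces A's binary search over [1, health] (each probe rescanning all gaps) by sorting the attack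
-- gaps once and solving f(k) = k + Σ min(k, gap) ≥ health algebraically on one linear pass (objective: faster).


-- ===== PORT A =====
-- count_health(k, lst): total = k; for i in range(len(lst)-1): total += min(k, lst[i+1]-lst[i])
-- (indices i and i+1 are always in range, so the default of pyGetD is never used)
def count_health (k : Int) (lst : List Int) : Int :=
  (PySem.List.pyRange 0 ((lst.length : Int) - 1) 1).foldl
    (fun total i => total + min k (PySem.List.pyGetD lst (i + 1) 0 - PySem.List.pyGetD lst i 0)) k

-- the while-loop of monocarp, on the state (left, right)
def bsearch (health : Int) (attacks : List Int) (left right : Int) : Int :=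
  if _h : left ≤ right then
    let mid := PySem.Int.floordiv (left + right) 2
    let val := count_health mid attacks
    if val = health then mid
    else if val > health then bsearch health attacks left (mid - 1)
    else bsearch health attacks (mid + 1) right
  else left
termination_by (right + 1 - left).toNat
decreasing_by
  · have := PySem.Int.floordiv_two_mid_bounds _h; omega
  · have := PySem.Int.floordiv_two_mid_bounds _h; omega

def monocarp (health : Int) (attacks : List Int) : Int :=
  bsearch health attacks 1 health

-- ===== PORT B =====
-- gaps = sorted(b - a for a, b in zip(attacks, attacks[1:]))  (attacks[1:] is drop 1)
def gapsOf (attacks : List Int) : List Int :=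
  (attacks.zip (attacks.drop 1)).map (fun p => p.2 - p.1)

-- the for/else loop of B: pre accumulates consumed gaps; slope = (#remaining gaps) + 1
-- = m - j + 1; on break k = -((pre - health) // slope) (ceiling division); else k = health - pre
def walkB (health : Int) (pre : Int) (gaps : List Int) : Int :=
  match gaps with
  | [] => health - pre
  | g :: rest =>
      let slope : Int := (rest.length : Int) + 2
      if health ≤ pre + g * slope then -(PySem.Int.floordiv (pre - health) slope)
      else walkB health (pre + g) rest

def monocarp_alt (health : Int) (attacks : List Int) : Int :=
  let gaps := PySem.List.sorted (gapsOf attacks) (fun x => x) false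
  max 1 (min (walkB health 0 gaps) (health + 1))

-- ===== PRECONDITION & SPEC =====
def Spec_monocarp (health : Int) (attacks : List Int) (out : Int) : Prop := out = monocarp_alt health attacks
instance (health : Int) (attacks : List Int) (out : Int) : Decidable (Spec_monocarp health attacks out) := by unfold Spec_monocarp; infer_instance

-- ===== CLAIM (what is proved, stated in full; the proofs are below) =====
def Claim_equal_monocarp : Prop := ∀ (health : Int) (attacks : List Int), Dom_monocarp health attacks → Spec_monocarp health attacks (monocarp health attacks)

-- ===== LEMMAS AND PROOFS =====

-- total damage contributed by the gaps: Σ min(k, d)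
def S (k : Int) (gaps : List Int) : Int := (gaps.map (fun d => min k d)).sum

theorem S_mono {k k' : Int} (h : k ≤ k') (gaps : List Int) : S k gaps ≤ S k' gaps := by
  induction gaps with
  | nil => simp [S]
  | cons g rest ih =>
      simp only [S, List.map_cons, List.sum_cons] at *
      have : min k g ≤ min k' g := min_le_min h le_rfl
      omega

theorem S_const {k : Int} (gaps : List Int) (h : ∀ d ∈ gaps, k ≤ d) :
    S k gaps = k * gaps.length := by
  induction gaps with
  | nil => simp [S]
  | cons g rest ih =>
      simp only [S, List.map_cons, List.sum_cons, List.length_cons] at *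
      have hg : min k g = k := min_eq_left (h g (by simp))
      rw [hg, ih (fun d hd => h d (by simp [hd]))]; push_cast; ring

theorem S_perm {k : Int} {xs ys : List Int} (h : xs.Perm ys) : S k xs = S k ys :=
  List.Perm.sum_eq (h.map _)

-- A's count_health is k + S k (gaps of lst)
theorem count_health_eq (k : Int) (lst : List Int) :
    count_health k lst = k + S k (gapsOf lst) := by
  unfold count_health S gapsOf
  rw [PySem.List.foldl_add]
  congr 1
  apply congrArg List.sum
  apply List.ext_getElem
  · simp [PySem.List.length_pyRange_one]
  · intro j h1 h2
    simp only [List.getElem_map, PySem.List.getElem_pyRange_one, List.getElem_zip, List.getElem_drop]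
    have hlen : j + 1 < lst.length := by
      simp [PySem.List.length_pyRange_one] at h1; omega
    rw [show (0 : Int) + (j : Int) + 1 = ((j+1 : Nat) : Int) by push_cast; ring,
        show (0 : Int) + (j : Int) = ((j : Nat) : Int) by ring]
    rw [PySem.List.pyGetD_eq_getElem _ _ (by positivity) (by exact_mod_cast hlen),
        PySem.List.pyGetD_eq_getElem _ _ (by positivity) (by exact_mod_cast (by omega : j < lst.length))]
    simp [Nat.add_comm]

-- the key threshold property of B's walk: on a sorted gap list,
-- health ≤ pre + k + S k gaps  ⟺  walkB health pre gaps ≤ k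
theorem walk_thresh (health : Int) :
    ∀ (gaps : List Int), gaps.Pairwise (· ≤ ·) → ∀ (pre k : Int),
      (health ≤ pre + k + S k gaps ↔ walkB health pre gaps ≤ k) := by
  intro gaps
  induction gaps with
  | nil => intro _ pre k; simp [walkB, S]; omega
  | cons g rest ih =>
      intro hpw pre k
      have hg : ∀ d ∈ rest, g ≤ d := fun d hd => List.rel_of_pairwise_cons hpw hd
      have hrest : rest.Pairwise (· ≤ ·) := hpw.of_cons
      set n : Int := (rest.length : Int) with hn
      have hn0 : 0 ≤ n := by positivity
      have hslope : (0:Int) < n + 2 := by omega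
      have hScons : S k (g :: rest) = min k g + S k rest := by simp [S]
      rw [walkB]
      by_cases hc : health ≤ pre + g * (n + 2)
      · rw [if_pos (by exact_mod_cast hc)]
        set L : Int := -(PySem.Int.floordiv (pre - health) (n + 2)) with hLdef
        have hceil : (L - 1) * (n + 2) < health - pre ∧ health - pre ≤ L * (n + 2) := by
          apply (PySem.Int.neg_floordiv_neg_eq_iff_of_pos hslope).mp
          rw [hLdef]; congr 1; congr 1; ring
        have hLg : L ≤ g := by
          have h1 : (L - 1) * (n + 2) < g * (n + 2) := lt_of_lt_of_le hceil.1 (by omega)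
          have := lt_of_mul_lt_mul_right h1 (by omega : (0:Int) ≤ n + 2)
          omega
        constructor
        · intro hle
          by_contra hk
          push Not at hk
          have hkg : k ≤ g := by omega
          have hmin : min k g = k := min_eq_left hkg
          have hSr : S k rest = k * n := by
            rw [S_const rest (fun d hd => le_trans (by omega) (hg d hd))]
          have hmul : k * (n + 2) ≤ (L - 1) * (n + 2) :=
            mul_le_mul_of_nonneg_right (by omega) (by omega)
          have hval : pre + k + S k (g :: rest) = pre + k * (n + 2) := by
            rw [hScons, hmin, hSr]; ring
          omega
        · intro hLk
          by_cases hkg : k ≤ g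
          · have hmin : min k g = k := min_eq_left hkg
            have hSr : S k rest = k * n := by
              rw [S_const rest (fun d hd => le_trans hkg (hg d hd))]
            have hmul : L * (n + 2) ≤ k * (n + 2) :=
              mul_le_mul_of_nonneg_right hLk (by omega)
            have hval : pre + k + S k (g :: rest) = pre + k * (n + 2) := by
              rw [hScons, hmin, hSr]; ring
            omega
          · push Not at hkg
            have hmono : pre + g + S g (g :: rest) ≤ pre + k + S k (g :: rest) := by
              have := S_mono (show g ≤ k by omega) (g :: rest)
              omega
            have hSg : S g (g :: rest) = g * (n + 1) := by
              rw [S_const (g :: rest) (fun d hd => by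
                rcases List.mem_cons.mp hd with h | h
                · exact h.ge
                · exact hg d h)]
              simp only [List.length_cons, hn]; push_cast; ring
            have : pre + g + g * (n + 1) = pre + g * (n + 2) := by ring
            omega
      · rw [if_neg (by exact_mod_cast hc)]
        push Not at hc
        have IH := ih hrest (pre + g)
        by_cases hkg : g ≤ k
        · have hmin : min k g = g := min_eq_right hkg
          rw [hScons, hmin, show pre + k + (g + S k rest) = pre + g + k + S k rest by ring]
          exact IH k
        · push Not at hkg
          have hmin : min k g = k := min_eq_left (by omega)
          have hSr : S k rest = k * n := by
            rw [S_const rest (fun d hd => le_trans (by omega) (hg d hd))]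
          have hgL : g < walkB health (pre + g) rest := by
            by_contra hgle
            push Not at hgle
            have := (IH g).mpr hgle
            have hSg : S g rest = g * n := S_const rest (hg)
            have : pre + g + g + g * n = pre + g * (n + 2) := by ring
            omega
          constructor
          · intro hle
            exfalso
            have hmul : k * (n + 2) ≤ g * (n + 2) :=
              mul_le_mul_of_nonneg_right (by omega) (by omega)
            have hval : pre + k + S k (g :: rest) = pre + k * (n + 2) := by
              rw [hScons, hmin, hSr]; ring
            omega
          · intro hLk; omega

-- binary-search loop characterisation
theorem bsearch_eq (health : Int) (attacks : List Int) (L : Int)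
    (H : ∀ k, health ≤ count_health k attacks ↔ L ≤ k) :
    ∀ l r : Int, bsearch health attacks l r = max l (min L (r + 1)) := by
  have M : ∀ k : Int, count_health (k - 1) attacks < count_health k attacks := by
    intro k
    rw [count_health_eq, count_health_eq]
    have := S_mono (show k - 1 ≤ k by omega) (gapsOf attacks)
    omega
  intro l r
  induction l, r using bsearch.induct health attacks with
  | case1 l r hlr mid val hvh =>
      have hb : l ≤ mid ∧ mid ≤ r := PySem.Int.floordiv_two_mid_bounds hlr
      rw [bsearch, dif_pos hlr]
      show (if val = health then mid
            else if val > health then bsearch health attacks l (mid - 1)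
            else bsearch health attacks (mid + 1) r) = max l (min L (r + 1))
      rw [if_pos hvh]
      have h1 : L ≤ mid := (H mid).mp (le_of_eq hvh.symm)
      have h2 : ¬ L ≤ mid - 1 := by
        intro hle
        have t1 := (H (mid - 1)).mpr hle
        have t2 := M mid
        have t3 : count_health (mid - 1) attacks = val - (val - count_health (mid - 1) attacks) := by ring
        omega
      omega
  | case2 l r hlr mid val hne hgt ih =>
      have hb : l ≤ mid ∧ mid ≤ r := PySem.Int.floordiv_two_mid_bounds hlr
      rw [bsearch, dif_pos hlr]
      show (if val = health then mid
            else if val > health then bsearch health attacks l (mid - 1)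
            else bsearch health attacks (mid + 1) r) = max l (min L (r + 1))
      rw [if_neg hne, if_pos hgt, ih]
      have h1 : L ≤ mid := (H mid).mp (by omega)
      omega
  | case3 l r hlr mid val hne hng ih =>
      have hb : l ≤ mid ∧ mid ≤ r := PySem.Int.floordiv_two_mid_bounds hlr
      rw [bsearch, dif_pos hlr]
      show (if val = health then mid
            else if val > health then bsearch health attacks l (mid - 1)
            else bsearch health attacks (mid + 1) r) = max l (min L (r + 1))
      rw [if_neg hne, if_neg hng, ih]
      have h1 : ¬ L ≤ mid := by
        intro hle
        have := (H mid).mpr hle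
        omega
      omega
  | case4 l r hlr =>
      rw [bsearch, dif_neg hlr]
      omega

-- ===== VERDICT (by name: the statement is the Claim_ definition above) =====
theorem monocarp_spec : Claim_equal_monocarp := by
  intro health attacks _
  unfold Spec_monocarp monocarp monocarp_alt
  set gaps := PySem.List.sorted (gapsOf attacks) (fun x => x) false with hg
  have hperm : gaps.Perm (gapsOf attacks) := PySem.List.sorted_perm _ _ _
  have hpw : gaps.Pairwise (· ≤ ·) := PySem.List.sorted_pairwise _ _
  set L := walkB health 0 gaps with hL
  have H : ∀ k, health ≤ count_health k attacks ↔ L ≤ k := by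
    intro k
    rw [count_health_eq, ← S_perm hperm, hL]
    have := walk_thresh health gaps hpw 0 k
    simpa using this
  simpa using bsearch_eq health attacks L H 1 health
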